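-- pv_equiv track=rewrite | github.com/arnoldaz/advent-of-code | 2023/11/main.py | get_star_distance_million
-- ===== SOURCE A (Python) =====
-- def get_star_distance_million(star1: tuple[int, int], star2: tuple[int, int], empty_rows: list[int], empty_columns: list[int]) -> int:
--     star_first_x = star1[0] if star1[0] >= star2[0] else star2[0]
--     star_second_x = star2[0] if star1[0] >= star2[0] else star1[0]
--
--     x_diff = star_first_x - star_second_x
--     for column in empty_columns:
--         if star_first_x > column > star_second_x:
--             x_diff += 1_000_000 - 1
--
--     star_first_y = star1[1] if star1[1] >= star2[1] else star2[1]
--     star_second_y = star2[1] if star1[1] >= star2[1] else star1[1]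
--
--     y_diff = star_first_y - star_second_y
--     for row in empty_rows:
--         if star_first_y > row > star_second_y:
--             y_diff += 1_000_000 - 1
--
--     return x_diff + y_diff
-- ===== SOURCE B (Python) =====
-- def _bisect_left(a, x):
--     lo, hi = 0, len(a)
--     while lo < hi:
--         mid = (lo + hi) // 2
--         if a[mid] < x:
--             lo = mid + 1
--         else:
--             hi = mid
--     return lo
--
--
-- def _bisect_right(a, x):
--     lo, hi = 0, len(a)
--     while lo < hi:
--         mid = (lo + hi) // 2
--         if x < a[mid]:
--             hi = mid
--         else:
--             lo = mid + 1
--     return lo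
--
--
-- def _gap(lo, hi, empties):
--     # each empty line strictly between lo and hi adds 999_999; count them by binary search
--     d = hi - lo
--     if d > 0:
--         s = sorted(empties)
--         d += 999_999 * (_bisect_left(s, hi) - _bisect_right(s, lo))
--     return d
--
--
-- def get_star_distance_million(star1: "tuple[int, int]", star2: "tuple[int, int]", empty_rows: "list[int]", empty_columns: "list[int]") -> int:
--     x_lo, x_hi = (star1[0], star2[0]) if star1[0] <= star2[0] else (star2[0], star1[0])
--     y_lo, y_hi = (star1[1], star2[1]) if star1[1] <= star2[1] else (star2[1], star1[1])
--     return _gap(x_lo, x_hi, empty_columns) + _gap(y_lo, y_hi, empty_rows)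
-- ===== Notes on version B (the rewrite author's own statement) =====
-- stated objective: alternative
-- what changed: instead of A's linear scan comparing every empty line against the interval, B sorts a copy of each empties list and counts the lines strictly between the two coordinates with two hand-written binary searches (bisect_left/bisect_right difference)
import Mathlib
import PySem

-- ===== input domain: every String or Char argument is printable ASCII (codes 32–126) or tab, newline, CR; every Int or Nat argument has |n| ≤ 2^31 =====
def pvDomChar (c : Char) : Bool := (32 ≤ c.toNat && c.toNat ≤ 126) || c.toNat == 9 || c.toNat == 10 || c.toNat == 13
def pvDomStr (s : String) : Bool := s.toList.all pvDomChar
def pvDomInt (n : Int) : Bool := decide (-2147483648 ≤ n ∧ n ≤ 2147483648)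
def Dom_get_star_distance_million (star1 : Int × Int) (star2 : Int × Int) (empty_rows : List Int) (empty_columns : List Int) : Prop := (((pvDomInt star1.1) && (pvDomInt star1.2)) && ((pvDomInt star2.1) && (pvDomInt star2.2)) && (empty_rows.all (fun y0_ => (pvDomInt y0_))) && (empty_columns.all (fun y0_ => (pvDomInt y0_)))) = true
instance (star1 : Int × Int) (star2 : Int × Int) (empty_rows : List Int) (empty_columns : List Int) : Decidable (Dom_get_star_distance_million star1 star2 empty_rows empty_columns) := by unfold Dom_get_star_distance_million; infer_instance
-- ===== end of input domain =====

-- B counts the empty lines strictly between the two coordinates by two binary searches on a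
-- sorted copy of each list instead of A's linear scan (alternative algorithm, similar cost).


-- ===== PORT A =====
def get_star_distance_million (star1 : Int × Int) (star2 : Int × Int) (empty_rows : List Int) (empty_columns : List Int) : Int :=
  let star_first_x := if star1.1 ≥ star2.1 then star1.1 else star2.1
  let star_second_x := if star1.1 ≥ star2.1 then star2.1 else star1.1
  let x_diff := empty_columns.foldl
    (fun acc column => if star_first_x > column ∧ column > star_second_x then acc + (1000000 - 1) else acc)
    (star_first_x - star_second_x)
  let star_first_y := if star1.2 ≥ star2.2 then star1.2 else star2.2
  let star_second_y := if star1.2 ≥ star2.2 then star2.2 else star1.2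
  let y_diff := empty_rows.foldl
    (fun acc row => if star_first_y > row ∧ row > star_second_y then acc + (1000000 - 1) else acc)
    (star_first_y - star_second_y)
  x_diff + y_diff

-- ===== PORT B =====
-- hand-written bisect loops of Source B; the while loop becomes fuel recursion (fuel = len, enough
-- since hi - lo shrinks); a[mid] is always in range in the Python, the `none` arm is unreachable
def pvBisectLeftLoop (xs : List Int) (x : Int) : Nat → Nat → Nat → Nat
  | 0, lo, _ => lo
  | fuel+1, lo, hi =>
    if lo < hi then
      match xs[(lo + hi) / 2]? with
      | some y => if y < x then pvBisectLeftLoop xs x fuel ((lo + hi) / 2 + 1) hi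
                  else pvBisectLeftLoop xs x fuel lo ((lo + hi) / 2)
      | none => lo
    else lo

def pvBisectRightLoop (xs : List Int) (x : Int) : Nat → Nat → Nat → Nat
  | 0, lo, _ => lo
  | fuel+1, lo, hi =>
    if lo < hi then
      match xs[(lo + hi) / 2]? with
      | some y => if x < y then pvBisectRightLoop xs x fuel lo ((lo + hi) / 2)
                  else pvBisectRightLoop xs x fuel ((lo + hi) / 2 + 1) hi
      | none => lo
    else lo

def pvBisectLeft (a : List Int) (x : Int) : Nat := pvBisectLeftLoop a x a.length 0 a.length

def pvBisectRight (a : List Int) (x : Int) : Nat := pvBisectRightLoop a x a.length 0 a.length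

def pvGap (lo hi : Int) (empties : List Int) : Int :=
  let d := hi - lo
  if d > 0 then
    let s := PySem.List.sorted empties (fun x => x) false
    d + 999999 * ((pvBisectLeft s hi : Int) - (pvBisectRight s lo : Int))
  else d

def get_star_distance_million_alt (star1 : Int × Int) (star2 : Int × Int) (empty_rows : List Int) (empty_columns : List Int) : Int :=
  let xp := if star1.1 ≤ star2.1 then (star1.1, star2.1) else (star2.1, star1.1)
  let yp := if star1.2 ≤ star2.2 then (star1.2, star2.2) else (star2.2, star1.2)
  pvGap xp.1 xp.2 empty_columns + pvGap yp.1 yp.2 empty_rows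

-- ===== PRECONDITION & SPEC =====
def Spec_get_star_distance_million (star1 : Int × Int) (star2 : Int × Int) (empty_rows : List Int) (empty_columns : List Int) (out : Int) : Prop := out = get_star_distance_million_alt star1 star2 empty_rows empty_columns
instance (star1 : Int × Int) (star2 : Int × Int) (empty_rows : List Int) (empty_columns : List Int) (out : Int) : Decidable (Spec_get_star_distance_million star1 star2 empty_rows empty_columns out) := by unfold Spec_get_star_distance_million; infer_instance

-- ===== CLAIM (what is proved, stated in full; the proofs are below) =====
def Claim_equal_get_star_distance_million : Prop := ∀ (star1 : Int × Int) (star2 : Int × Int) (empty_rows : List Int) (empty_columns : List Int), Dom_get_star_distance_million star1 star2 empty_rows empty_columns → Spec_get_star_distance_million star1 star2 empty_rows empty_columns (get_star_distance_million star1 star2 empty_rows empty_columns)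

-- ===== LEMMAS AND PROOFS =====

-- my transliterated loops coincide with PySem's bisect loops (same code, so their specs apply)
theorem pvBisectLeftLoop_eq (xs : List Int) (x : Int) :
    ∀ (fuel lo hi : Nat), pvBisectLeftLoop xs x fuel lo hi = PySem.List.bisectLeftLoop xs x fuel lo hi := by
  intro fuel
  induction fuel with
  | zero => intro lo hi; rfl
  | succ f ih =>
    intro lo hi
    simp only [pvBisectLeftLoop, PySem.List.bisectLeftLoop]
    split_ifs with h
    · cases hxs : xs[(lo + hi) / 2]? with
      | none => rfl
      | some y => simp only [ih]
    · rfl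

theorem pvBisectRightLoop_eq (xs : List Int) (x : Int) :
    ∀ (fuel lo hi : Nat), pvBisectRightLoop xs x fuel lo hi = PySem.List.bisectRightLoop xs x fuel lo hi := by
  intro fuel
  induction fuel with
  | zero => intro lo hi; rfl
  | succ f ih =>
    intro lo hi
    simp only [pvBisectRightLoop, PySem.List.bisectRightLoop]
    split_ifs with h
    · cases hxs : xs[(lo + hi) / 2]? with
      | none => rfl
      | some y => simp only [ih]
    · rfl

theorem pvBisectLeft_eq (a : List Int) (x : Int) : pvBisectLeft a x = PySem.List.bisectLeft a x :=
  pvBisectLeftLoop_eq a x a.length 0 a.length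

theorem pvBisectRight_eq (a : List Int) (x : Int) : pvBisectRight a x = PySem.List.bisectRight a x :=
  pvBisectRightLoop_eq a x a.length 0 a.length

-- counting by an index window: if p holds exactly on indices in [R, L), countP = L - R
theorem countP_of_index_window (p : Int → Bool) :
    ∀ (s : List Int) (R L : Nat), R ≤ L → L ≤ s.length →
      (∀ (j : Nat) (h : j < s.length), p s[j] = decide (R ≤ j ∧ j < L)) →
      s.countP p = L - R := by
  intro s
  induction s with
  | nil =>
    intro R L hRL hL _
    simp only [List.length_nil, Nat.le_zero] at hL
    simp only [List.countP_nil]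
    omega
  | cons a t ih =>
    intro R L hRL hL hp
    have ha : p a = decide (R ≤ 0 ∧ 0 < L) := hp 0 (by simp)
    have ht : ∀ (j : Nat) (h : j < t.length), p t[j] = decide (R - 1 ≤ j ∧ j < L - 1) := by
      intro j hj
      have h1 := hp (j + 1) (by simp only [List.length_cons]; omega)
      simp only [List.getElem_cons_succ] at h1
      rw [h1]
      simp only [decide_eq_decide]
      omega
    have htc := ih (R - 1) (L - 1) (by omega) (by simp only [List.length_cons] at hL; omega) ht
    simp only [List.countP_cons, htc, ha]
    by_cases h0 : R ≤ 0 ∧ 0 < L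
    · simp only [decide_eq_true h0, if_true]
      omega
    · simp only [decide_eq_false h0, Bool.false_eq_true, if_false]
      omega

-- on a sorted list with lo < hi, bisect_left(hi) - bisect_right(lo) counts elements strictly between
theorem bisect_count (s : List Int) (lo hi : Int) (hs : s.Pairwise (· ≤ ·)) (hlt : lo < hi) :
    (PySem.List.bisectLeft s hi : Int) - (PySem.List.bisectRight s lo : Int)
      = s.countP (fun c => decide (lo < c ∧ c < hi)) := by
  obtain ⟨hL_le, hL_lt, hL_ge⟩ := PySem.List.bisectLeft_spec s hi hs
  obtain ⟨hR_le, hR_lt, hR_ge⟩ := PySem.List.bisectRight_spec s lo hs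
  set L := PySem.List.bisectLeft s hi with hLdef
  set R := PySem.List.bisectRight s lo with hRdef
  have hRL : R ≤ L := by
    by_contra hc
    push_neg at hc
    have hlen : L < s.length := Nat.lt_of_lt_of_le hc hR_le
    have h1 : s[L] ≤ lo := hR_lt L hlen hc
    have h2 : hi ≤ s[L] := hL_ge L hlen (Nat.le_refl L)
    omega
  have hcount := countP_of_index_window (fun c => decide (lo < c ∧ c < hi)) s R L hRL hL_le ?_
  · rw [hcount]; omega
  · intro j hj
    simp only [decide_eq_decide]
    constructor
    · intro ⟨h1, h2⟩
      constructor
      · by_contra hc; push_neg at hc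
        have := hR_lt j hj hc; omega
      · by_contra hc; push_neg at hc
        have := hL_ge j hj hc; omega
    · intro ⟨h1, h2⟩
      exact ⟨hR_ge j hj h1, hL_lt j hj h2⟩

-- A's loop adds k per element satisfying p
theorem foldl_if_add_k (p : Int → Prop) [DecidablePred p] (k : Int) :
    ∀ (s : List Int) (init : Int),
      s.foldl (fun acc c => if p c then acc + k else acc) init
        = init + k * s.countP (fun c => decide (p c)) := by
  intro s
  induction s with
  | nil => intro init; simp
  | cons a t ih =>
    intro init
    simp only [List.foldl_cons, List.countP_cons, ih]
    by_cases hp : p a <;> simp [hp] <;> push_cast <;> ring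

-- one axis: A's scan-based diff equals B's pvGap, for sorted empties
theorem axis_eq (u v : Int) (s : List Int) :
    (let fst := if u ≥ v then u else v
     let snd := if u ≥ v then v else u
     s.foldl (fun acc c => if fst > c ∧ c > snd then acc + (1000000 - 1) else acc) (fst - snd))
      = (let p := if u ≤ v then (u, v) else (v, u); pvGap p.1 p.2 s) := by
  have key : ∀ (lo hi : Int), lo ≤ hi →
      s.foldl (fun acc c => if hi > c ∧ c > lo then acc + (1000000 - 1) else acc) (hi - lo)
        = pvGap lo hi s := by
    intro lo hi hle
    rw [foldl_if_add_k (fun c => hi > c ∧ c > lo) (1000000 - 1) s (hi - lo)]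
    unfold pvGap
    rcases lt_or_eq_of_le hle with hlt | heq
    · set t := PySem.List.sorted s (fun x => x) false with htdef
      have hts : t.Pairwise (· ≤ ·) := PySem.List.sorted_pairwise s (fun x => x)
      have htp : t.Perm s := PySem.List.sorted_perm s (fun x => x) false
      rw [if_pos (by omega)]
      show hi - lo + (1000000 - 1) * ((s.countP (fun c => decide (hi > c ∧ c > lo)) : Nat) : Int)
            = hi - lo + 999999 * ((pvBisectLeft t hi : Int) - (pvBisectRight t lo : Int))
      rw [pvBisectLeft_eq, pvBisectRight_eq, bisect_count t lo hi hts hlt]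
      rw [htp.countP_eq]
      have : (fun c => decide (hi > c ∧ c > lo)) = (fun c => decide (lo < c ∧ c < hi)) := by
        funext c; simp only [decide_eq_decide]; constructor <;> intro ⟨h1, h2⟩ <;> exact ⟨h2, h1⟩
      rw [this]; ring
    · subst heq
      rw [if_neg (by omega)]
      have : s.countP (fun c => decide (lo > c ∧ c > lo)) = 0 := by
        apply List.countP_eq_zero.mpr; intro c _; simp; omega
      rw [this]; ring
  by_cases h : v ≤ u
  · by_cases he : u ≤ v
    · have huv : u = v := le_antisymm he h
      subst huv
      simp only [ge_iff_le, le_refl, if_pos]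
      exact key u u (le_refl u)
    · simp only [ge_iff_le, if_pos h, if_neg he]
      exact key v u h
  · simp only [ge_iff_le, if_neg h, if_pos (by omega : u ≤ v)]
    exact key u v (by omega)

-- ===== VERDICT (by name: the statement is the Claim_ definition above) =====
theorem get_star_distance_million_spec : Claim_equal_get_star_distance_million := by
  intro star1 star2 empty_rows empty_columns _
  unfold Spec_get_star_distance_million get_star_distance_million get_star_distance_million_alt
  have hx := axis_eq star1.1 star2.1 empty_columns
  have hy := axis_eq star1.2 star2.2 empty_rows
  simp only at hx hy ⊢
  rw [hx, hy]
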